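-- pv_equiv track=rewrite | github.com/TobyYang7/csc3050_toby | CSC3050_P2/py_test/simulator_functions.py | static_data
-- ===== SOURCE A (Python) =====
-- def as_string(string1, memory, index, type):
--     """
--     Converts a string to its binary representation and stores it in memory.
--
--     Args:
--     string1 (str): The string to be converted.
--     memory (list): The memory to store the binary representation.
--     index (int): The starting index in memory to store the binary representation.
--     type (str): The type of string, either '.ascii' or '.asciiz'.
--
--     Returns:
--     tuple: A tuple containing the updated memory and index.
--
--     """
--     begin_index = string1.find('"')+1
--     end_index = string1[begin_index:].find('"')+begin_index
--     static_string = string1[begin_index:end_index].replace('\\n', '\n')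
--     block_num = len(static_string)//4
--     remainder = len(static_string) % 4
--     for i in range(0, block_num):
--         substring = static_string[4*i:4*i+4]
--         # Convert each character in the substring to its binary representation and store it in memory
--         memory[index] = ''.join(extended(format(ord(c), 'b'), 8)
--                                 for c in substring)
--         index += 1
--     if not (remainder == 0 and type == '.ascii'):
--         remain_string = static_string[4*block_num:]
--         # Store the remaining characters in memory
--         memory = last_block(memory, index, remain_string, remainder, type)[0]
--         index = last_block(memory, index, remain_string, remainder, type)[1]
--     return (memory, index)
--
-- def last_block(memory, index, remain_string, remainder, type):
--     """
--     This function is used to fill the last block of memory with the remaining string.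
--     If the remainder is 0 and the type is '.asciiz', it fills the block with all zeros.
--     If the remainder is 1, it fills the block with the remaining string and appends 24 zeros.
--     If the remainder is 2, it fills the block with the remaining string and appends 16 zeros.
--     If the remainder is 3, it fills the block with the remaining string and appends 8 zeros.
--
--     Args:
--     memory (list): The memory block to be filled.
--     index (int): The index of the current block.
--     remain_string (str): The remaining string to be filled in the last block.
--     remainder (int): The remainder of the remaining string length divided by 4.
--     type (str): The type of the remaining string.
--
--     Returns:
--     tuple: A tuple containing the updated memory block and index.
--     """
--     if remainder == 0 and type == '.asciiz':
--         # If remainder is 0 and type is '.asciiz', fill the block with all zeros.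
--         memory[index] = '0'*32
--     elif remainder == 1:
--         # If remainder is 1, fill the block with the remaining string and append 24 zeros.
--         memory[index] = ''.join(extended(format(ord(c), 'b'), 8)
--                                 for c in remain_string) + '0'*24
--     elif remainder == 2:
--         # If remainder is 2, fill the block with the remaining string and append 16 zeros.
--         memory[index] = ''.join(extended(format(ord(c), 'b'), 8)
--                                 for c in remain_string) + '0'*16
--     elif remainder == 3:
--         # If remainder is 3, fill the block with the remaining string and append 8 zeros.
--         memory[index] = ''.join(extended(format(ord(c), 'b'), 8)
--                                 for c in remain_string) + '0'*8
--     index += 1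
--     return (memory, index)
--
-- def static_data(content, memory, index):
--     """
--     This function extracts static data from the given content and stores it in memory.
--
--     Args:
--     - content (list): A list of strings representing the content of a file.
--     - memory (dict): A dictionary representing the memory of the simulator.
--     - index (int): An integer representing the current index of memory.
--
--     Returns:
--     - A tuple containing the updated memory and index.
--
--     """
--     tag_data = False
--     for i in content:
--         if ".data" in i:
--             tag_data = True
--         elif ".text" in i:
--             break
--         if tag_data:
--             if ".asciiz" in i:
--                 memory = as_string(i, memory, index, ".asciiz")[0]
--                 index = as_string(i, memory, index, ".asciiz")[1]
--     return (memory, index)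
--
-- def extended(binary_number, length):
--     if length >= len(binary_number):
--         binary_number = (length-len(binary_number))*'0' + binary_number
--     return binary_number
-- ===== SOURCE B (Python) =====
-- def static_data(content, memory, index):
--     tag_data = False
--     for line in content:
--         if ".data" in line:
--             tag_data = True
--         elif ".text" in line:
--             break
--         if tag_data and ".asciiz" in line:
--             b = line.find('"') + 1
--             e = line[b:].find('"') + b
--             s = line[b:e].replace('\\n', '\n') + '\0'
--             while s:
--                 group, s = s[:4], s[4:]
--                 word = ''.join(format(ord(c), 'b').rjust(8, '0') for c in group)
--                 memory[index] = word + '0' * (8 * (4 - len(group)))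
--                 index += 1
--     return (memory, index)
-- ===== Notes on version B (the rewrite author's own statement) =====
-- stated objective: simpler
-- what changed: B replaces A's block_num/remainder arithmetic, the separate full-block loop, the four-branch last_block helper and the duplicated as_string/last_block calls with one uniform pass: append a NUL terminator, slice the string into 4-char groups, and emit each group as one word right-padded with 8*(4-len(group)) zero bits.
import Mathlib
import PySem

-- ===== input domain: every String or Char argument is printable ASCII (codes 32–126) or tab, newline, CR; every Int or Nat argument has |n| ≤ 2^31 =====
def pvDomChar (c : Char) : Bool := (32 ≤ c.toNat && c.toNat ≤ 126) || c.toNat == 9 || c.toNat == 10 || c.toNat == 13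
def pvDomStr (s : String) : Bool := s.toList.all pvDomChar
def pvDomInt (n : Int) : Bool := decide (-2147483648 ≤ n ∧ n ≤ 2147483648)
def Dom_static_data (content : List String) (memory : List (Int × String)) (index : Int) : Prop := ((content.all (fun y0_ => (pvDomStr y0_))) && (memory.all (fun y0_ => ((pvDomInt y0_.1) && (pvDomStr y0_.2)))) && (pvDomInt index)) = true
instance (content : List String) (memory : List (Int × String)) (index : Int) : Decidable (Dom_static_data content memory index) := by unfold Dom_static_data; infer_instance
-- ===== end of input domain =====

-- B keeps A's line scan and quoted-string extraction but replaces the block_num/remainder encoder (full-block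
-- loop + four-branch last_block + duplicated calls) with one uniform pass: append a NUL, cut into 4-char groups,
-- pad the last group. Simpler decomposition, same return value; both Pythons mutate `memory` in place alike.

-- ===== PORT A =====
-- extended(binary_number, length)
def extended (b : List Char) (length : Int) : List Char :=
  if (b.length : Int) ≤ length then List.replicate (length - (b.length : Int)).toNat '0' ++ b else b

-- the per-character expression `extended(format(ord(c), 'b'), 8)`
def encA (c : Char) : List Char := extended (PySem.Int.toBinChars (c.toNat : Int)) 8

-- last_block(memory, index, remain_string, remainder, type)
def last_block (memory : PySem.Dict Int String) (index : Int) (remain_string : List Char)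
    (remainder : Int) (type : String) : PySem.Dict Int String × Int :=
  let memory :=
    if remainder = 0 ∧ type = ".asciiz" then
      PySem.Dict.insert memory index (String.ofList (List.replicate 32 '0'))
    else if remainder = 1 then
      PySem.Dict.insert memory index (String.ofList (PySem.Chars.join [] (remain_string.map encA) ++ List.replicate 24 '0'))
    else if remainder = 2 then
      PySem.Dict.insert memory index (String.ofList (PySem.Chars.join [] (remain_string.map encA) ++ List.replicate 16 '0'))
    else if remainder = 3 then
      PySem.Dict.insert memory index (String.ofList (PySem.Chars.join [] (remain_string.map encA) ++ List.replicate 8 '0'))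
    else memory
  (memory, index + 1)

-- as_string(string1, memory, index, type)
def as_string (string1 : String) (memory : PySem.Dict Int String) (index : Int) (type : String) :
    PySem.Dict Int String × Int :=
  let cs := string1.toList
  let begin_index : Int := PySem.Chars.find cs ['"'] + 1
  let end_index : Int := PySem.Chars.find (PySem.Chars.slice cs (some begin_index) none) ['"'] + begin_index
  let static_string := PySem.Chars.replace (PySem.Chars.slice cs (some begin_index) (some end_index)) ['\\', 'n'] ['\n']
  let block_num := PySem.Int.floordiv (static_string.length : Int) 4
  let remainder := PySem.Int.mod (static_string.length : Int) 4
  let st := (PySem.List.pyRange 0 block_num).foldl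
    (fun (st : PySem.Dict Int String × Int) i =>
      let substring := PySem.Chars.slice static_string (some (4 * i)) (some (4 * i + 4))
      (PySem.Dict.insert st.1 st.2 (String.ofList (PySem.Chars.join [] (substring.map encA))), st.2 + 1))
    (memory, index)
  if ¬ (remainder = 0 ∧ type = ".ascii") then
    let remain_string := PySem.Chars.slice static_string (some (4 * block_num)) none
    let memory' := (last_block st.1 st.2 remain_string remainder type).1
    let index' := (last_block memory' st.2 remain_string remainder type).2
    (memory', index')
  else st

-- `memory = as_string(i, memory, index, ".asciiz")[0]; index = as_string(i, memory, index, ".asciiz")[1]`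
def static_data_step (i : String) (m : PySem.Dict Int String) (idx : Int) : PySem.Dict Int String × Int :=
  let m' := (as_string i m idx ".asciiz").1
  (m', (as_string i m' idx ".asciiz").2)

-- the `for i in content` loop with tag_data and break
def static_data_go (content : List String) (tag : Bool) (m : PySem.Dict Int String) (idx : Int) :
    PySem.Dict Int String × Int :=
  match content with
  | [] => (m, idx)
  | i :: rest =>
    if PySem.Str.isIn ".data" i then
      let st := if PySem.Str.isIn ".asciiz" i then static_data_step i m idx else (m, idx)
      static_data_go rest true st.1 st.2
    else if PySem.Str.isIn ".text" i then (m, idx)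
    else if tag then
      let st := if PySem.Str.isIn ".asciiz" i then static_data_step i m idx else (m, idx)
      static_data_go rest tag st.1 st.2
    else static_data_go rest tag m idx

def static_data (content : List String) (memory : List (Int × String)) (index : Int) :
    (List (Int × String)) × Int :=
  let st := static_data_go content false (PySem.Dict.ofList memory) index
  (st.1.items, st.2)

-- ===== PORT B =====
-- format(ord(c), 'b').rjust(8, '0')
def encB (c : Char) : List Char :=
  let b := PySem.Int.toBinChars (c.toNat : Int)
  if b.length < 8 then List.replicate (8 - b.length) '0' ++ b else b

-- the `while s: group, s = s[:4], s[4:]; …` loop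
def emit_words (s : List Char) (m : PySem.Dict Int String) (idx : Int) : PySem.Dict Int String × Int :=
  match s with
  | [] => (m, idx)
  | a :: t =>
    let group := (a :: t).take 4
    let word := PySem.Chars.join [] (group.map encB) ++ List.replicate (8 * (4 - group.length)) '0'
    emit_words (t.drop 3) (PySem.Dict.insert m idx (String.ofList word)) (idx + 1)
termination_by s.length
decreasing_by simp [List.length_drop]

def static_data_alt_step (line : String) (m : PySem.Dict Int String) (idx : Int) :
    PySem.Dict Int String × Int :=
  let cs := line.toList
  let b : Int := PySem.Chars.find cs ['"'] + 1
  let e : Int := PySem.Chars.find (PySem.Chars.slice cs (some b) none) ['"'] + b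
  let s := PySem.Chars.replace (PySem.Chars.slice cs (some b) (some e)) ['\\', 'n'] ['\n'] ++ [Char.ofNat 0]
  emit_words s m idx

def static_data_alt_go (content : List String) (tag : Bool) (m : PySem.Dict Int String) (idx : Int) :
    PySem.Dict Int String × Int :=
  match content with
  | [] => (m, idx)
  | line :: rest =>
    if PySem.Str.isIn ".data" line then
      let st := if PySem.Str.isIn ".asciiz" line then static_data_alt_step line m idx else (m, idx)
      static_data_alt_go rest true st.1 st.2
    else if PySem.Str.isIn ".text" line then (m, idx)
    else if tag then
      let st := if PySem.Str.isIn ".asciiz" line then static_data_alt_step line m idx else (m, idx)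
      static_data_alt_go rest tag st.1 st.2
    else static_data_alt_go rest tag m idx

def static_data_alt (content : List String) (memory : List (Int × String)) (index : Int) :
    (List (Int × String)) × Int :=
  let st := static_data_alt_go content false (PySem.Dict.ofList memory) index
  (st.1.items, st.2)

-- ===== PRECONDITION & SPEC =====
def Spec_static_data (content : List String) (memory : List (Int × String)) (index : Int) (out : (List (Int × String)) × Int) : Prop := out = static_data_alt content memory index
instance (content : List String) (memory : List (Int × String)) (index : Int) (out : (List (Int × String)) × Int) : Decidable (Spec_static_data content memory index out) := by unfold Spec_static_data; infer_instance

-- ===== CLAIM (what is proved, stated in full; the proofs are below) =====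
def Claim_equal_static_data : Prop := ∀ (content : List String) (memory : List (Int × String)) (index : Int), Dom_static_data content memory index → Spec_static_data content memory index (static_data content memory index)

-- ===== LEMMAS AND PROOFS =====

-- the per-character fields of the two ports coincide (both left-pad the binary digits to 8, never truncate)
theorem encA_eq_encB (c : Char) : encA c = encB c := by
  unfold encA encB extended
  set b := PySem.Int.toBinChars (c.toNat : Int) with hb
  rcases Nat.lt_or_ge b.length 8 with h | h
  · rw [if_pos (by exact_mod_cast Nat.le_of_lt h), if_pos h]
    have : ((8 : Int) - (b.length : Int)).toNat = 8 - b.length := by omega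
    rw [this]
  · rcases Nat.eq_or_lt_of_le h with h8 | h8
    · rw [if_pos (by omega), if_neg (by omega), ← h8]
      simp
    · rw [if_neg (by omega), if_neg (by omega)]

-- recursive model of A's full-block loop
def wwA : Nat → List Char → PySem.Dict Int String → Int → PySem.Dict Int String × Int
  | 0, _, m, idx => (m, idx)
  | n + 1, s, m, idx =>
      wwA n (s.drop 4)
        (PySem.Dict.insert m idx (String.ofList (PySem.Chars.join [] ((s.take 4).map encA)))) (idx + 1)

theorem wwA_snd (n : Nat) : ∀ (s : List Char) (m : PySem.Dict Int String) (idx : Int),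
    (wwA n s m idx).2 = idx + n := by
  induction n with
  | zero => intro s m idx; simp [wwA]
  | succ k ih => intro s m idx; rw [wwA, ih]; omega

theorem slice4 (s : List Char) (a : Nat) :
    PySem.List.slice s (some ((a : Nat) : Int)) (some (((a : Nat) : Int) + 4)) = (s.drop a).take 4 := by
  rw [show (((a : Nat) : Int) + 4) = (((a : Nat) : Int) + (((4 : Nat) : Nat) : Int)) by norm_num,
      PySem.List.slice_natCast_add]

theorem slice04 (s : List Char) : PySem.List.slice s (some 0) (some 4) = s.take 4 := by
  simpa using slice4 s 0

-- A's indexed loop over range(0, block_num) is the recursive model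
theorem foldA_eq_wwA (n : Nat) : ∀ (s : List Char) (m : PySem.Dict Int String) (idx : Int),
    ((PySem.List.pyRange 0 (n : Int)).foldl
      (fun (st : PySem.Dict Int String × Int) i =>
        (PySem.Dict.insert st.1 st.2
          (String.ofList (PySem.Chars.join [] ((PySem.Chars.slice s (some (4 * i)) (some (4 * i + 4))).map encA))),
         st.2 + 1))
      (m, idx)) = wwA n s m idx := by
  induction n with
  | zero => intro s m idx; simp [wwA]
  | succ k ih =>
    intro s m idx
    rw [PySem.List.pyRange_one]
    simp only [Int.sub_zero, Int.toNat_natCast, List.range_succ_eq_map, List.map_cons,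
      List.foldl_cons, List.map_map, List.foldl_map, Function.comp_def]
    simp only [Nat.cast_succ, Nat.cast_zero, add_zero, zero_add, mul_zero,
      PySem.Chars.slice_eq_listSlice]
    rw [slice04]
    have hfun : (fun (x : PySem.Dict Int String × Int) (y : Nat) =>
        (PySem.Dict.insert x.1 x.2 (String.ofList (PySem.Chars.join [] (List.map encA
          (PySem.List.slice s (some (4 * ((y:Int) + 1))) (some (4 * ((y:Int) + 1) + 4)))))), x.2 + 1))
      = (fun (x : PySem.Dict Int String × Int) (y : Nat) =>
        (PySem.Dict.insert x.1 x.2 (String.ofList (PySem.Chars.join [] (List.map encA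
          (PySem.List.slice (s.drop 4) (some (4 * (y:Int))) (some (4 * (y:Int) + 4)))))), x.2 + 1)) := by
      funext x y
      rw [show (4 * ((y:Int) + 1) + 4) = (((4*y+4 : Nat)):Int) + 4 by push_cast; ring,
          show (4 * ((y:Int) + 1)) = (((4*y+4 : Nat)):Int) by push_cast; ring,
          slice4,
          show (4 * ((y:Int)) + 4) = (((4*y : Nat)):Int) + 4 by push_cast; ring,
          show (4 * ((y:Int))) = (((4*y : Nat)):Int) by push_cast; ring,
          slice4, List.drop_drop, show 4*y+4 = 4+4*y from by omega]
    rw [hfun]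
    have ihh := ih (s.drop 4)
      (PySem.Dict.insert m idx (String.ofList (PySem.Chars.join [] (List.map encA (s.take 4))))) (idx + 1)
    rw [PySem.List.pyRange_one] at ihh
    simp only [Int.sub_zero, Int.toNat_natCast, List.foldl_map, zero_add,
      PySem.Chars.slice_eq_listSlice] at ihh
    rw [wwA]
    exact ihh

-- A's whole encoder (full blocks then last_block) on the extracted string
def encodeA (s : List Char) (m : PySem.Dict Int String) (idx : Int) : PySem.Dict Int String × Int :=
  let st := wwA (s.length / 4) s m idx
  last_block st.1 st.2 (s.drop (4 * (s.length / 4))) ((s.length % 4 : Nat) : Int) ".asciiz"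

theorem joinNil_cons (x : List Char) (xs : List (List Char)) :
    PySem.Chars.join [] (x :: xs) = x ++ PySem.Chars.join [] xs := by
  cases xs with
  | nil => simp [PySem.Chars.join_singleton, PySem.Chars.join_nil]
  | cons q rest => simp [PySem.Chars.join_cons_cons]

theorem encB_nul : encB (Char.ofNat 0) = List.replicate 8 '0' := by decide

theorem word_eq (g : List Char) :
    PySem.Chars.join [] (g.map encA) = PySem.Chars.join [] (g.map encB) := by
  rw [List.map_congr_left (fun c _ => encA_eq_encB c)]

theorem emit_words_nil (m : PySem.Dict Int String) (idx : Int) : emit_words [] m idx = (m, idx) := by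
  rw [emit_words]

theorem emit_words_cons (a : Char) (t : List Char) (m : PySem.Dict Int String) (idx : Int) :
    emit_words (a :: t) m idx = emit_words (t.drop 3)
      (PySem.Dict.insert m idx (String.ofList (PySem.Chars.join [] (((a :: t).take 4).map encB)
        ++ List.replicate (8 * (4 - ((a :: t).take 4).length)) '0'))) (idx + 1) := by
  rw [emit_words]

theorem encodeA_eq_emit (s : List Char) (m : PySem.Dict Int String) (idx : Int) :
    encodeA s m idx = emit_words (s ++ [Char.ofNat 0]) m idx := by
  match s with
  | [] =>
    rw [show encodeA [] m idx = (PySem.Dict.insert m idx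
        (String.ofList (List.replicate 32 '0')), idx + 1) by
      simp only [encodeA]; norm_num [wwA, last_block]]
    simp only [List.nil_append]
    rw [emit_words_cons]
    simp only [show List.take 4 ([Char.ofNat 0] : List Char) = [Char.ofNat 0] from rfl,
      show List.drop 3 ([] : List Char) = [] from rfl,
      show 8 * (4 - ([Char.ofNat 0] : List Char).length) = 24 from rfl, emit_words_nil]
    congr 3
  | [a] =>
    rw [show encodeA [a] m idx = (PySem.Dict.insert m idx
        (String.ofList (PySem.Chars.join [] (List.map encA [a]) ++ List.replicate 24 '0')), idx + 1) by
      simp only [encodeA]; norm_num [wwA, last_block]]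
    simp only [List.cons_append, List.nil_append]
    rw [emit_words_cons]
    simp only [show List.take 4 [a, Char.ofNat 0] = [a, Char.ofNat 0] from rfl,
      show List.drop 3 ([Char.ofNat 0] : List Char) = [] from rfl,
      show 8 * (4 - ([a, Char.ofNat 0] : List Char).length) = 16 from rfl, emit_words_nil]
    congr 3
    simp only [List.map, joinNil_cons, PySem.Chars.join_nil, encB_nul, encA_eq_encB, List.append_nil]
    rw [show (24 : Nat) = 8 + 16 by norm_num, List.replicate_add]
    simp [List.append_assoc]
  | [a, b] =>
    rw [show encodeA [a, b] m idx = (PySem.Dict.insert m idx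
        (String.ofList (PySem.Chars.join [] (List.map encA [a, b]) ++ List.replicate 16 '0')), idx + 1) by
      simp only [encodeA]; norm_num [wwA, last_block]]
    simp only [List.cons_append, List.nil_append]
    rw [emit_words_cons]
    simp only [show List.take 4 [a, b, Char.ofNat 0] = [a, b, Char.ofNat 0] from rfl,
      show List.drop 3 ([b, Char.ofNat 0] : List Char) = [] from rfl,
      show 8 * (4 - ([a, b, Char.ofNat 0] : List Char).length) = 8 from rfl, emit_words_nil]
    congr 3
    simp only [List.map, joinNil_cons, PySem.Chars.join_nil, encB_nul, encA_eq_encB, List.append_nil]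
    rw [show (16 : Nat) = 8 + 8 by norm_num, List.replicate_add]
    simp [List.append_assoc]
  | [a, b, c] =>
    rw [show encodeA [a, b, c] m idx = (PySem.Dict.insert m idx
        (String.ofList (PySem.Chars.join [] (List.map encA [a, b, c]) ++ List.replicate 8 '0')), idx + 1) by
      simp only [encodeA]; norm_num [wwA, last_block]]
    simp only [List.cons_append, List.nil_append]
    rw [emit_words_cons]
    simp only [show List.take 4 [a, b, c, Char.ofNat 0] = [a, b, c, Char.ofNat 0] from rfl,
      show List.drop 3 ([b, c, Char.ofNat 0] : List Char) = [] from rfl,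
      show 8 * (4 - ([a, b, c, Char.ofNat 0] : List Char).length) = 0 from rfl, emit_words_nil]
    congr 3
    simp only [List.map, joinNil_cons, PySem.Chars.join_nil, encB_nul, encA_eq_encB, List.append_nil]
    simp [List.append_assoc]
  | a :: b :: c :: d :: t =>
    have hdiv : (a :: b :: c :: d :: t).length / 4 = t.length / 4 + 1 := by simp; omega
    have hmod : (a :: b :: c :: d :: t).length % 4 = t.length % 4 := by simp; omega
    have hdrop : List.drop (4 * (t.length / 4) + 4) (a :: b :: c :: d :: t)
        = List.drop (4 * (t.length / 4)) t := by
      rw [show 4 * (t.length / 4) + 4 = 4 + 4 * (t.length / 4) by ring,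
        ← List.drop_drop (i := 4 * (t.length / 4)) (j := 4)]
      rfl
    have ih := encodeA_eq_emit t
      (PySem.Dict.insert m idx (String.ofList (PySem.Chars.join [] ([a, b, c, d].map encA)))) (idx + 1)
    simp only [encodeA, hdiv, hmod, wwA,
      show List.drop 4 (a :: b :: c :: d :: t) = t from rfl,
      show List.take 4 (a :: b :: c :: d :: t) = [a, b, c, d] from rfl] at ih ⊢
    rw [show 4 * (t.length / 4 + 1) = 4 * (t.length / 4) + 4 by ring, hdrop, ih]
    rw [List.cons_append, List.cons_append, List.cons_append, List.cons_append, emit_words_cons]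
    simp only [show ∀ r : List Char, List.take 4 (a :: b :: c :: d :: r) = [a, b, c, d] from fun _ => rfl,
      show ∀ r : List Char, List.drop 3 (b :: c :: d :: r) = r from fun _ => rfl,
      show 8 * (4 - ([a, b, c, d] : List Char).length) = 0 from rfl]
    rw [← word_eq]
    norm_num
termination_by s.length
decreasing_by simp; omega

theorem last_block_snd (m : PySem.Dict Int String) (i : Int) (r : List Char) (re : Int) (t : String) :
    (last_block m i r re t).2 = i + 1 := rfl

theorem encodeA_snd (s : List Char) (m : PySem.Dict Int String) (idx : Int) :
    (encodeA s m idx).2 = idx + (s.length / 4 : Nat) + 1 := by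
  simp [encodeA, last_block_snd, wwA_snd]

-- the quoted-string extraction both ports perform, as one name (proof-side helper)
def extract (line : String) : List Char :=
  let cs := line.toList
  let b : Int := PySem.Chars.find cs ['"'] + 1
  let e : Int := PySem.Chars.find (PySem.Chars.slice cs (some b) none) ['"'] + b
  PySem.Chars.replace (PySem.Chars.slice cs (some b) (some e)) ['\\', 'n'] ['\n']

theorem as_string_asciiz (i : String) (m : PySem.Dict Int String) (idx : Int) :
    as_string i m idx ".asciiz" = encodeA (extract i) m idx := by
  unfold as_string extract
  dsimp only
  generalize (PySem.Chars.replace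
    (PySem.Chars.slice i.toList (some (PySem.Chars.find i.toList ['"'] + 1))
      (some (PySem.Chars.find (PySem.Chars.slice i.toList (some (PySem.Chars.find i.toList ['"'] + 1)) none) ['"'] +
        (PySem.Chars.find i.toList ['"'] + 1))))
    ['\\', 'n'] ['\n']) = s
  have h4 : PySem.Int.floordiv ((s.length : Nat) : Int) 4 = ((s.length / 4 : Nat) : Int) := by
    exact_mod_cast PySem.Int.floordiv_natCast s.length 4
  have hm : PySem.Int.mod ((s.length : Nat) : Int) 4 = ((s.length % 4 : Nat) : Int) := by
    exact_mod_cast PySem.Int.mod_natCast s.length 4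
  rw [h4, hm, foldA_eq_wwA,
    if_pos (show ¬(((s.length % 4 : Nat) : Int) = 0 ∧ (".asciiz" : String) = ".ascii") from
      fun h => absurd h.2 (by decide))]
  have hslice : PySem.Chars.slice s (some (4 * ((s.length / 4 : Nat) : Int))) none
      = s.drop (4 * (s.length / 4)) := by
    rw [show (4 * ((s.length / 4 : Nat) : Int)) = ((4 * (s.length / 4) : Nat) : Int) by push_cast; ring]
    simp only [PySem.Chars.slice_eq_listSlice, PySem.List.slice_from_natCast]
  rw [hslice]
  dsimp only [encodeA]
  exact Prod.ext rfl (by rw [last_block_snd, last_block_snd])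

theorem step_eq (i : String) (m : PySem.Dict Int String) (idx : Int) :
    static_data_step i m idx = static_data_alt_step i m idx := by
  have halt : static_data_alt_step i m idx = emit_words (extract i ++ [Char.ofNat 0]) m idx := rfl
  rw [halt, ← encodeA_eq_emit]
  show ((as_string i m idx ".asciiz").1, (as_string i (as_string i m idx ".asciiz").1 idx ".asciiz").2) = _
  rw [as_string_asciiz, as_string_asciiz, encodeA_snd]
  have := encodeA_snd (extract i) m idx
  exact Prod.ext rfl (by rw [this])

theorem go_eq (content : List String) : ∀ (tag : Bool) (m : PySem.Dict Int String) (idx : Int),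
    static_data_go content tag m idx = static_data_alt_go content tag m idx := by
  induction content with
  | nil => intro tag m idx; rfl
  | cons i rest ih =>
    intro tag m idx
    rw [static_data_go, static_data_alt_go]
    by_cases h1 : PySem.Str.isIn ".data" i
    · simp only [h1, if_true, step_eq, ih]
    · by_cases h2 : PySem.Str.isIn ".text" i
      · simp only [h1, h2, Bool.false_eq_true, if_false, if_true]
      · by_cases h3 : tag
        · simp only [h1, h2, h3, Bool.false_eq_true, if_false, if_true, step_eq, ih]
        · simp only [h1, h2, h3, Bool.false_eq_true, if_false, ih]

-- ===== VERDICT (by name: the statement is the Claim_ definition above) =====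
theorem static_data_spec : Claim_equal_static_data := by
  intro content memory index _
  unfold Spec_static_data static_data static_data_alt
  rw [go_eq]
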